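-- pv_equiv track=rewrite | github.com/datnim24/1_Thesis | Reactive_GUI.py | _ordered_actions
-- ===== SOURCE A (Python) =====
-- def _ordered_actions(mask):
--     ordered = []
--     for sku in ("PSC", "NDG", "BUSTA"):
--         for a in mask:
--             if a == ("WAIT",) or a[0] != sku:
--                 continue
--             ordered.append(a)
--     ordered.append(("WAIT",))
--     return ordered
-- ===== SOURCE B (Python) =====
-- def _ordered_actions(mask):
--     psc, ndg, busta = [], [], []
--     for a in mask:
--         h = a[0]
--         if h == "PSC":
--             psc.append(a)
--         elif h == "NDG":
--             ndg.append(a)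
--         elif h == "BUSTA":
--             busta.append(a)
--     return psc + ndg + busta + [("WAIT",)]
-- ===== Notes on version B (the rewrite author's own statement) =====
-- stated objective: alternative
-- what changed: Replaced A's three full passes over mask (one per SKU priority) by a single bucketing pass into three lists that are concatenated in priority order.
import Mathlib
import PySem

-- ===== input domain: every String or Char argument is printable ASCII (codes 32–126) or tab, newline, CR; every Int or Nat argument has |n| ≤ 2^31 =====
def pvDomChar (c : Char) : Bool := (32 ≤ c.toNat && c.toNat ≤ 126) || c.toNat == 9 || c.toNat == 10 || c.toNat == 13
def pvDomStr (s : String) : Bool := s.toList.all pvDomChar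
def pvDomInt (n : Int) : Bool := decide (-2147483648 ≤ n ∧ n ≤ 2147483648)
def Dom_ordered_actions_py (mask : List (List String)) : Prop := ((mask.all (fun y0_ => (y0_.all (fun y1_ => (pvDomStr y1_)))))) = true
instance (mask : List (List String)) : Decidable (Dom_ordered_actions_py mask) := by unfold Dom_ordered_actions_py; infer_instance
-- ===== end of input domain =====

-- B replaces A's three priority passes over mask by one bucketing pass; equivalence on the return value, on inputs where A raises no IndexError.

-- ===== PORT A =====
-- literal port: for each sku in ("PSC","NDG","BUSTA") scan mask, skipping ("WAIT",) and non-matching heads;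
-- a[0] on an empty action is an IndexError in Python (pyGet? = none); such inputs are excluded by Pre_.
def ordered_actions_py (mask : List (List String)) : List (List String) :=
  let ordered := (["PSC", "NDG", "BUSTA"]).foldl (fun ord sku =>
    mask.foldl (fun ord a =>
      if a = ["WAIT"] then ord
      else match PySem.List.pyGet? a 0 with
        | none => ord              -- Python raises IndexError here; outside Pre_
        | some h => if h ≠ sku then ord else ord ++ [a]) ord) []
  ordered ++ [["WAIT"]]

-- ===== PORT B =====
-- literal port of Source B: one pass filling three buckets, then concatenation in priority order.
def ordered_actions_py_alt (mask : List (List String)) : List (List String) :=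
  let bk := mask.foldl (fun (bk : List (List String) × List (List String) × List (List String)) a =>
      match PySem.List.pyGet? a 0 with
      | none => bk                 -- Python raises IndexError here; outside Pre_
      | some h =>
        if h = "PSC" then (bk.1 ++ [a], bk.2.1, bk.2.2)
        else if h = "NDG" then (bk.1, bk.2.1 ++ [a], bk.2.2)
        else if h = "BUSTA" then (bk.1, bk.2.1, bk.2.2 ++ [a])
        else bk)
    ([], [], [])
  bk.1 ++ bk.2.1 ++ bk.2.2 ++ [["WAIT"]]

-- ===== PRECONDITION & SPEC =====
-- Pre_ excludes masks containing an empty action: both Pythons raise IndexError on a[0] there.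
def Pre_ordered_actions_py (mask : List (List String)) : Prop := ∀ a ∈ mask, a ≠ []
instance (mask : List (List String)) : Decidable (Pre_ordered_actions_py mask) := by unfold Pre_ordered_actions_py; infer_instance
def pvWitness_ordered_actions_py : List (List String) := [["NDG"], ["WAIT"], ["PSC", "x"], ["foo"]]
def Spec_ordered_actions_py (mask : List (List String)) (out : List (List String)) : Prop := out = ordered_actions_py_alt mask
instance (mask : List (List String)) (out : List (List String)) : Decidable (Spec_ordered_actions_py mask out) := by unfold Spec_ordered_actions_py; infer_instance

-- ===== CLAIM (what is proved, stated in full; the proofs are below) =====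
def Claim_equal_ordered_actions_py : Prop := ∀ (mask : List (List String)), Dom_ordered_actions_py mask → Pre_ordered_actions_py mask → Spec_ordered_actions_py mask (ordered_actions_py mask)

-- ===== LEMMAS AND PROOFS =====

-- A's inner scan for one sku is a filter appended to the accumulator.
theorem pvA_inner (sku : String) (mask : List (List String)) (ord : List (List String)) :
    mask.foldl (fun ord a =>
      if a = ["WAIT"] then ord
      else match PySem.List.pyGet? a 0 with
        | none => ord
        | some h => if h ≠ sku then ord else ord ++ [a]) ord
    = ord ++ mask.filter (fun a =>
        if a = ["WAIT"] then false
        else match PySem.List.pyGet? a 0 with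
          | none => false
          | some h => h == sku) := by
  induction mask generalizing ord with
  | nil => simp
  | cons a t ih =>
    simp only [List.foldl_cons, List.filter_cons]
    rw [ih]
    by_cases hw : a = ["WAIT"]
    · simp [hw]
    · cases hg : PySem.List.pyGet? a 0 with
      | none => simp [hw, hg]
      | some h =>
        by_cases hs : h = sku
        · simp [hw, hg, hs]
        · simp [hw, hg, hs]

-- B's single pass fills the three buckets with the three corresponding filters.
theorem pvB_fold (mask : List (List String)) (b1 b2 b3 : List (List String)) :
    mask.foldl (fun (bk : List (List String) × List (List String) × List (List String)) a =>
      match PySem.List.pyGet? a 0 with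
      | none => bk
      | some h =>
        if h = "PSC" then (bk.1 ++ [a], bk.2.1, bk.2.2)
        else if h = "NDG" then (bk.1, bk.2.1 ++ [a], bk.2.2)
        else if h = "BUSTA" then (bk.1, bk.2.1, bk.2.2 ++ [a])
        else bk) (b1, b2, b3)
    = (b1 ++ mask.filter (fun a => PySem.List.pyGet? a 0 == some "PSC"),
       b2 ++ mask.filter (fun a => PySem.List.pyGet? a 0 == some "NDG"),
       b3 ++ mask.filter (fun a => PySem.List.pyGet? a 0 == some "BUSTA")) := by
  induction mask generalizing b1 b2 b3 with
  | nil => simp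
  | cons a t ih =>
    simp only [List.foldl_cons, List.filter_cons]
    rw [ih]
    cases hg : PySem.List.pyGet? a 0 with
    | none => simp [hg]
    | some h =>
      by_cases h1 : h = "PSC"
      · simp [hg, h1]
      · by_cases h2 : h = "NDG"
        · simp [hg, h1, h2]
        · by_cases h3 : h = "BUSTA"
          · simp [hg, h1, h2, h3]
          · simp [hg, h1, h2, h3]

-- A's per-sku filter coincides with B's bucket filter for each of the three keys
-- (["WAIT"]'s head is "WAIT", which is none of them).
theorem pvFilter_eq (sku : String) (hsku : sku ≠ "WAIT") (mask : List (List String)) :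
    mask.filter (fun a =>
        if a = ["WAIT"] then false
        else match PySem.List.pyGet? a 0 with
          | none => false
          | some h => h == sku)
    = mask.filter (fun a => PySem.List.pyGet? a 0 == some sku) := by
  apply List.filter_congr
  intro a _
  by_cases hw : a = ["WAIT"]
  · subst hw
    simp [PySem.List.pyGet?, PySem.List.pyIdx?]
    intro h; exact absurd h.symm hsku
  · cases hg : PySem.List.pyGet? a 0 with
    | none => simp [hw, hg]
    | some h => simp [hw, hg]

-- ===== VERDICT (by name: the statement is the Claim_ definition above) =====
theorem ordered_actions_py_spec : Claim_equal_ordered_actions_py := by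
  intro mask _ _
  show ordered_actions_py mask = ordered_actions_py_alt mask
  unfold ordered_actions_py ordered_actions_py_alt
  simp only [List.foldl_cons, List.foldl_nil, pvA_inner, pvB_fold]
  rw [pvFilter_eq "PSC" (by decide), pvFilter_eq "NDG" (by decide), pvFilter_eq "BUSTA" (by decide)]
  simp
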